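-- pv_equiv track=rewrite | github.com/IT2901-24-2018/vapi | backend/api/mapper/mapper.py | find_time_period_per_segment
-- ===== SOURCE A (Python) =====
-- def find_time_period_per_segment(prod_data):
--     """
--     Finds the segment id and latest time connected to it
--     :param prod_data: Mapped production data
--     :type prod_data: list
--     :return: dict of segments and the latest time they were handled
--     :rtype: dict
--     """
--     segment_times = {}
--     for data in prod_data:
--         if str(data["segment"]) not in segment_times:
--             segment_times[str(data["segment"])] = {"earliest_time": data["time"], "latest_time": data["time"]}
--         elif data["time"] > segment_times[str(data["segment"])]["latest_time"]:
--             segment_times[str(data["segment"])]["latest_time"] = data["time"]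
--         elif data["time"] < segment_times[str(data["segment"])]["earliest_time"]:
--             segment_times[str(data["segment"])]["earliest_time"] = data["time"]
--
--     return segment_times
-- ===== SOURCE B (Python) =====
-- def find_time_period_per_segment(prod_data):
--     groups = {}
--     for data in prod_data:
--         groups.setdefault(str(data["segment"]), []).append(data["time"])
--     return {seg: {"earliest_time": min(times), "latest_time": max(times)}
--             for seg, times in groups.items()}
-- ===== Notes on version B (the rewrite author's own statement) =====
-- stated objective: alternative
-- what changed: B replaces A's incremental per-element min/max tracking (membership test + compare-and-update branches) with a two-phase group-then-reduce: one pass grouping all times per segment key via setdefault, then a comprehension taking min and max of each group.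
import Mathlib
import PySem

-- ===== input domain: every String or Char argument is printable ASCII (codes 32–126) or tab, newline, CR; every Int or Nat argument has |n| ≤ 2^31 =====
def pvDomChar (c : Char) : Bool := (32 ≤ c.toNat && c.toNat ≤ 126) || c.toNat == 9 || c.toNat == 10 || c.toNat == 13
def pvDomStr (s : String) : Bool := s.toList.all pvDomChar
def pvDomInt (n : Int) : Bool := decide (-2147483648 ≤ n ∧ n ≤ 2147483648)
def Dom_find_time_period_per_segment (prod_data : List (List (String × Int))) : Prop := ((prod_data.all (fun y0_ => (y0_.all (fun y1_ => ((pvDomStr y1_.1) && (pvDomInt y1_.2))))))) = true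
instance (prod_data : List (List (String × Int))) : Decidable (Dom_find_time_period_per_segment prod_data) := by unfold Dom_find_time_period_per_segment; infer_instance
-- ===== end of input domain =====

-- B groups all times per segment first (setdefault-append), then takes min/max per group,
-- replacing A's incremental single-pass min/max tracking; same cost, different decomposition.

-- ===== PORT A =====
-- one iteration of A's loop body (dicts are PySem.Dict; data["k"] under Pre_ is getD)
def pvAStep (st : PySem.Dict String (PySem.Dict String Int)) (data : List (String × Int)) :
    PySem.Dict String (PySem.Dict String Int) :=
  let seg := PySem.Int.toStr ((PySem.Dict.mk data).getD "segment" 0)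
  let t := (PySem.Dict.mk data).getD "time" 0
  match st.get? seg with
  | none => st.insert seg (PySem.Dict.mk [("earliest_time", t), ("latest_time", t)])
  | some v =>
    if v.getD "latest_time" 0 < t then st.insert seg (v.insert "latest_time" t)
    else if t < v.getD "earliest_time" 0 then st.insert seg (v.insert "earliest_time" t)
    else st

def find_time_period_per_segment (prod_data : List (List (String × Int))) :
    List (String × List (String × Int)) :=
  ((prod_data.foldl pvAStep PySem.Dict.empty).items).map (fun p => (p.1, p.2.items))

-- ===== PORT B =====
-- groups.setdefault(key, []).append(t)  ==  groups[key] = groups.get(key, []) + [t]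
def pvGroupStep (g : PySem.Dict String (List Int)) (data : List (String × Int)) :
    PySem.Dict String (List Int) :=
  let seg := PySem.Int.toStr ((PySem.Dict.mk data).getD "segment" 0)
  g.insert seg (g.getD seg [] ++ [(PySem.Dict.mk data).getD "time" 0])

-- {"earliest_time": min(times), "latest_time": max(times)}
def pvSummary (ts : List Int) : List (String × Int) :=
  [("earliest_time", (PySem.List.min? ts (fun x => x)).getD 0),
   ("latest_time", (PySem.List.max? ts (fun x => x)).getD 0)]

def find_time_period_per_segment_alt (prod_data : List (List (String × Int))) :
    List (String × List (String × Int)) :=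
  ((prod_data.foldl pvGroupStep PySem.Dict.empty).items).map (fun p => (p.1, pvSummary p.2))

-- ===== PRECONDITION & SPEC =====
-- Pre_ excludes exactly the inputs where Python A raises KeyError: some entry lacks a "segment" or "time" key.
def Pre_find_time_period_per_segment (prod_data : List (List (String × Int))) : Prop :=
  ∀ data ∈ prod_data, "segment" ∈ data.map (·.1) ∧ "time" ∈ data.map (·.1)
instance (prod_data : List (List (String × Int))) : Decidable (Pre_find_time_period_per_segment prod_data) := by
  unfold Pre_find_time_period_per_segment; infer_instance

def pvWitness_find_time_period_per_segment : (List (List (String × Int))) :=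
  [[("segment", 1), ("time", 5)], [("segment", 1), ("time", 2)]]

def Spec_find_time_period_per_segment (prod_data : List (List (String × Int))) (out : List (String × List (String × Int))) : Prop := out = find_time_period_per_segment_alt prod_data
instance (prod_data : List (List (String × Int))) (out : List (String × List (String × Int))) : Decidable (Spec_find_time_period_per_segment prod_data out) := by unfold Spec_find_time_period_per_segment; infer_instance

-- ===== CLAIM (what is proved, stated in full; the proofs are below) =====
def Claim_equal_find_time_period_per_segment : Prop := ∀ (prod_data : List (List (String × Int))), Dom_find_time_period_per_segment prod_data → Pre_find_time_period_per_segment prod_data → Spec_find_time_period_per_segment prod_data (find_time_period_per_segment prod_data)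

-- ===== LEMMAS AND PROOFS =====

-- abstraction: A's running state is exactly the per-key summary of B's grouping state
def pvSumm (g : PySem.Dict String (List Int)) : PySem.Dict String (PySem.Dict String Int) :=
  PySem.Dict.mk (g.items.map (fun p => (p.1, PySem.Dict.mk (pvSummary p.2))))

-- lookup through a value-map of the underlying items list
lemma pv_get?_mk_map {ν ν' : Type} (f : ν → ν') (l : List (String × ν)) (k : String) :
    (PySem.Dict.mk (l.map (fun p => (p.1, f p.2)))).get? k = ((PySem.Dict.mk l).get? k).map f := by
  induction l with
  | nil => simp [PySem.Dict.get?]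
  | cons hd tl ih =>
    rw [List.map_cons, PySem.Dict.get?_mk_cons, PySem.Dict.get?_mk_cons]
    cases h : (hd.1 == k)
    · simp [ih]
    · simp

lemma pv_get?_summ (g : PySem.Dict String (List Int)) (k : String) :
    (pvSumm g).get? k = (g.get? k).map (fun ts => PySem.Dict.mk (pvSummary ts)) := by
  have := pv_get?_mk_map (fun ts => PySem.Dict.mk (pvSummary ts)) g.items k
  simpa [pvSumm] using this

lemma pv_keys_summ (g : PySem.Dict String (List Int)) : (pvSumm g).keys = g.keys := by
  simp only [pvSumm, PySem.Dict.keys, List.map_map]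
  rfl

lemma pv_contains_mk_map {ν ν' : Type} (f : ν → ν') (g : PySem.Dict String ν) (k : String) :
    (PySem.Dict.mk (g.items.map (fun p => (p.1, f p.2)))).contains k = g.contains k := by
  rw [PySem.Dict.contains_eq_isSome_get?, PySem.Dict.contains_eq_isSome_get?, pv_get?_mk_map]
  cases h : (PySem.Dict.mk g.items).get? k <;> simp_all

lemma pv_insert_mk_map {ν ν' : Type} (f : ν → ν') (g : PySem.Dict String ν) (k : String) (v : ν) :
    (PySem.Dict.mk (g.items.map (fun p => (p.1, f p.2)))).insert k (f v)
      = PySem.Dict.mk ((g.insert k v).items.map (fun p => (p.1, f p.2))) := by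
  apply PySem.Dict.ext
  rw [PySem.Dict.items_insert, PySem.Dict.items_insert, pv_contains_mk_map]
  by_cases hc : g.contains k = true
  · simp only [hc, if_true, List.map_map]
    apply List.map_congr_left
    intro p hp
    by_cases h : p.1 = k <;> simp [h]
  · simp only [Bool.not_eq_true] at hc
    simp [hc]

lemma pv_insert_get?_self {ν : Type} (d : PySem.Dict String ν) (k : String) (v : ν)
    (hnd : d.keys.Nodup) (h : d.get? k = some v) : d.insert k v = d := by
  apply PySem.Dict.ext
  have hc : d.contains k = true := by rw [PySem.Dict.contains_eq_isSome_get?, h]; rfl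
  rw [PySem.Dict.items_insert, if_pos hc]
  conv_rhs => rw [← List.map_id d.items]
  apply List.map_congr_left
  intro p hp
  cases hpk : (p.1 == k) with
  | false => simp
  | true =>
    have hk : p.1 = k := by simpa using hpk
    subst hk
    have h2 := PySem.Dict.get?_of_mem_items d hp hnd
    rw [h] at h2
    have hv : v = p.2 := by injection h2
    simp [hv]

lemma pv_summary_append (x t : Int) (r : List Int) :
    pvSummary (x :: r ++ [t])
      = [("earliest_time", min (r.foldl min x) t), ("latest_time", max (r.foldl max x) t)] := by
  have hmin := PySem.List.min?_id_cons (x := x) (t := r ++ [t])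
  have hmax := PySem.List.max?_id_cons (x := x) (t := r ++ [t])
  simp [pvSummary, hmin, hmax, List.foldl_append]

lemma pv_step (g : PySem.Dict String (List Int)) (data : List (String × Int))
    (hnd : g.keys.Nodup) (hne : ∀ p ∈ g.items, p.2 ≠ []) :
    pvAStep (pvSumm g) data = pvSumm (pvGroupStep g data) := by
  unfold pvAStep pvGroupStep
  dsimp only
  generalize PySem.Int.toStr ((PySem.Dict.mk data).getD "segment" 0) = seg
  generalize (PySem.Dict.mk data).getD "time" 0 = t
  rw [pv_get?_summ]
  cases hg : g.get? seg with
  | none =>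
    have hd : g.getD seg [] = [] := by simp [PySem.Dict.getD_eq_get?_getD, hg]
    have hs : pvSummary [t] = [("earliest_time", t), ("latest_time", t)] := by
      have hmin := PySem.List.min?_id_cons (x := t) (t := ([] : List Int))
      have hmax := PySem.List.max?_id_cons (x := t) (t := ([] : List Int))
      simp [pvSummary, hmin, hmax]
    simp only [Option.map_none]
    rw [hd]
    show (pvSumm g).insert seg (PySem.Dict.mk [("earliest_time", t), ("latest_time", t)])
        = pvSumm (g.insert seg ([] ++ [t]))
    rw [← hs]
    exact pv_insert_mk_map (fun ts => PySem.Dict.mk (pvSummary ts)) g seg ([] ++ [t])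
  | some ts =>
    have hts : ts ≠ [] := hne (seg, ts) (PySem.Dict.mem_items_of_get?_eq_some g hg)
    obtain ⟨x, r, rfl⟩ := List.exists_cons_of_ne_nil hts
    have hmin := PySem.List.min?_id_cons (x := x) (t := r)
    have hmax := PySem.List.max?_id_cons (x := x) (t := r)
    have hsum : pvSummary (x :: r) = [("earliest_time", r.foldl min x), ("latest_time", r.foldl max x)] := by
      simp [pvSummary, hmin, hmax]
    have hd : g.getD seg [] = x :: r := by simp [PySem.Dict.getD_eq_get?_getD, hg]
    have hmM : r.foldl min x ≤ r.foldl max x := by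
      have hm : r.foldl min x ∈ x :: r := PySem.List.min?_mem hmin
      have := PySem.List.max?_isMax hmax _ hm
      simpa using this
    simp only [Option.map_some, hsum]
    have hgl : (PySem.Dict.mk [("earliest_time", r.foldl min x), ("latest_time", r.foldl max x)]).getD "latest_time" 0 = r.foldl max x := by
      simp [PySem.Dict.getD_eq_get?_getD, PySem.Dict.get?_mk_cons]
    have hge : (PySem.Dict.mk [("earliest_time", r.foldl min x), ("latest_time", r.foldl max x)]).getD "earliest_time" 0 = r.foldl min x := by
      simp [PySem.Dict.getD_eq_get?_getD, PySem.Dict.get?_mk_cons]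
    rw [hgl, hge, hd]
    by_cases hMt : r.foldl max x < t
    · rw [if_pos hMt]
      have hins : (PySem.Dict.mk [("earliest_time", r.foldl min x), ("latest_time", r.foldl max x)]).insert "latest_time" t
          = PySem.Dict.mk [("earliest_time", r.foldl min x), ("latest_time", t)] := by
        apply PySem.Dict.ext
        rw [PySem.Dict.items_insert]
        simp
      rw [hins]
      have hsum2 : pvSummary (x :: r ++ [t]) = [("earliest_time", r.foldl min x), ("latest_time", t)] := by
        rw [pv_summary_append]
        rw [min_eq_left (le_of_lt (lt_of_le_of_lt hmM hMt)), max_eq_right (le_of_lt hMt)]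
      rw [show PySem.Dict.mk [("earliest_time", r.foldl min x), ("latest_time", t)]
            = PySem.Dict.mk (pvSummary (x :: r ++ [t])) from by rw [hsum2]]
      exact pv_insert_mk_map (fun ts => PySem.Dict.mk (pvSummary ts)) g seg (x :: r ++ [t])
    · rw [if_neg hMt]
      by_cases htm : t < r.foldl min x
      · rw [if_pos htm]
        have hins : (PySem.Dict.mk [("earliest_time", r.foldl min x), ("latest_time", r.foldl max x)]).insert "earliest_time" t
            = PySem.Dict.mk [("earliest_time", t), ("latest_time", r.foldl max x)] := by
          apply PySem.Dict.ext
          rw [PySem.Dict.items_insert]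
          simp
        rw [hins]
        have hsum2 : pvSummary (x :: r ++ [t]) = [("earliest_time", t), ("latest_time", r.foldl max x)] := by
          rw [pv_summary_append]
          rw [min_eq_right (le_of_lt htm), max_eq_left (le_of_lt (lt_of_lt_of_le htm hmM))]
        rw [show PySem.Dict.mk [("earliest_time", t), ("latest_time", r.foldl max x)]
              = PySem.Dict.mk (pvSummary (x :: r ++ [t])) from by rw [hsum2]]
        exact pv_insert_mk_map (fun ts => PySem.Dict.mk (pvSummary ts)) g seg (x :: r ++ [t])
      · rw [if_neg htm]
        have hsum2 : pvSummary (x :: r ++ [t]) = [("earliest_time", r.foldl min x), ("latest_time", r.foldl max x)] := by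
          rw [pv_summary_append]
          rw [min_eq_left (le_of_not_gt htm), max_eq_left (le_of_not_gt hMt)]
        have := pv_insert_mk_map (fun ts => PySem.Dict.mk (pvSummary ts)) g seg (x :: r ++ [t])
        rw [hsum2] at this
        rw [← hsum] at this
        have hself : (pvSumm g).insert seg (PySem.Dict.mk (pvSummary (x :: r))) = pvSumm g := by
          apply pv_insert_get?_self
          · rw [pv_keys_summ]; exact hnd
          · rw [pv_get?_summ, hg]; rfl
        show pvSumm g = pvSumm (g.insert seg (x :: r ++ [t]))
        rw [← hself]
        exact this

lemma pv_fold (l : List (List (String × Int))) (g : PySem.Dict String (List Int))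
    (hnd : g.keys.Nodup) (hne : ∀ p ∈ g.items, p.2 ≠ []) :
    l.foldl pvAStep (pvSumm g) = pvSumm (l.foldl pvGroupStep g) := by
  induction l generalizing g with
  | nil => rfl
  | cons d tl ih =>
    simp only [List.foldl_cons]
    rw [pv_step g d hnd hne]
    apply ih
    · unfold pvGroupStep
      exact PySem.Dict.nodup_keys_insert _ _ _ hnd
    · intro p hp
      unfold pvGroupStep at hp
      rw [PySem.Dict.mem_items_insert] at hp
      rcases hp with rfl | ⟨hp, _⟩
      · simp
      · exact hne p hp

-- ===== VERDICT (by name: the statement is the Claim_ definition above) =====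
theorem find_time_period_per_segment_spec : Claim_equal_find_time_period_per_segment := by
  intro pd _ _
  unfold Spec_find_time_period_per_segment
  unfold find_time_period_per_segment find_time_period_per_segment_alt
  have h := pv_fold pd PySem.Dict.empty PySem.Dict.nodup_keys_empty
    (by have he0 : (PySem.Dict.empty : PySem.Dict String (List Int)).items = [] := rfl
        simp [he0])
  have he : pvSumm PySem.Dict.empty = PySem.Dict.empty := rfl
  rw [he] at h
  rw [h]
  simp [pvSumm, List.map_map]
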